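-- pv_equiv track=rewrite | github.com/hiro19933/glacier-monitor | glacier_lodge_monitor_github_actions.py | block_for_hotel
-- ===== SOURCE A (Python) =====
-- HOTEL_ORDER = [
--     "Many Glacier Hotel",
--     "Lake McDonald Lodge",
--     "Cedar Creek Lodge",
--     "Swiftcurrent Motor Inn & Cabins",
--     "Rising Sun Motor Inn & Cabins",
--     "Village Inn at Apgar",
-- ]
--
-- def block_for_hotel(full_text: str, hotel_name: str) -> str:
--     lower = full_text.lower()
--     target = hotel_name.lower()
--     start = lower.find(target)
--     if start == -1:
--         return ""
--     end = len(full_text)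
--     for other in HOTEL_ORDER:
--         other_lower = other.lower()
--         if other_lower == target:
--             continue
--         idx = lower.find(other_lower, start + len(target))
--         if idx != -1:
--             end = min(end, idx)
--     return full_text[start:end]
-- ===== SOURCE B (Python) =====
-- import re
--
-- HOTEL_ORDER = [
--     "Many Glacier Hotel",
--     "Lake McDonald Lodge",
--     "Cedar Creek Lodge",
--     "Swiftcurrent Motor Inn & Cabins",
--     "Rising Sun Motor Inn & Cabins",
--     "Village Inn at Apgar",
-- ]
--
-- def block_for_hotel(full_text: str, hotel_name: str) -> str:
--     lower = full_text.lower()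
--     target = hotel_name.lower()
--     start = lower.find(target)
--     if start == -1:
--         return ""
--     pattern = "|".join(re.escape(h.lower()) for h in HOTEL_ORDER if h.lower() != target)
--     match = re.compile(pattern).search(lower, start + len(target))
--     end = match.start() if match else len(full_text)
--     return full_text[start:end]
-- ===== Notes on version B (the rewrite author's own statement) =====
-- stated objective: idiomatic
-- what changed: Replaces the per-hotel loop of six str.find scans combined with min() by one combined regex (the '|'-join of the escaped lowercased other hotel names) searched once from start+len(target); the leftmost match position of the alternation equals the minimum of the per-name first occurrences.
import Mathlib
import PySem

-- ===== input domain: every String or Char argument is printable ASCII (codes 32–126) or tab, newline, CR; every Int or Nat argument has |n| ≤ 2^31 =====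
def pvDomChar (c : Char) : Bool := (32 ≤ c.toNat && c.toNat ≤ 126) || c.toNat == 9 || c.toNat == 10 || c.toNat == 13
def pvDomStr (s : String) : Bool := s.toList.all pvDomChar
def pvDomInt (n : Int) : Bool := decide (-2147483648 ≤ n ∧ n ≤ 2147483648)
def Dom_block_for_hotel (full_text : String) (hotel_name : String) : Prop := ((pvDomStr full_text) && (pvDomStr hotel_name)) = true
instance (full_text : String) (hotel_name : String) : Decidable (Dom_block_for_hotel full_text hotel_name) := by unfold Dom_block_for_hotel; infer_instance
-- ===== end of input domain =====

-- B replaces the six per-hotel find-and-min scans by one combined leftmost-match search (idiomatic single scan).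

-- ===== PORT A =====
def HOTEL_ORDER : List String :=
  ["Many Glacier Hotel", "Lake McDonald Lodge", "Cedar Creek Lodge",
   "Swiftcurrent Motor Inn & Cabins", "Rising Sun Motor Inn & Cabins", "Village Inn at Apgar"]

-- A's loop body, named so the fold lemmas can speak about it (same computation, same order)
def stepA (lowerS target : String) (searchFrom : Int) (e : Int) (other : String) : Int :=
  let other_lower := PySem.Str.lower other
  if other_lower = target then e
  else
    let idx := PySem.Str.findFrom lowerS other_lower searchFrom
    if idx ≠ -1 then min e idx else e

def block_for_hotel (full_text : String) (hotel_name : String) : String :=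
  let lower := PySem.Str.lower full_text
  let target := PySem.Str.lower hotel_name
  let start := PySem.Str.find lower target
  if start = -1 then ""
  else
    let endv := HOTEL_ORDER.foldl (stepA lower target (start + PySem.Str.len target)) (PySem.Str.len full_text)
    PySem.Str.slice full_text (some start) (some endv)

-- ===== PORT B =====
-- Source B's `re.compile("|".join(re.escape(o) for o in others)).search(lower, pos)` is, exactly,
-- the leftmost position ≥ pos at which some alternative (a literal string) occurs in `lower`
-- (returning no match if there is none); pvScan is that left-to-right scan, step for step.
def pvScan (l : List Char) (os : List (List Char)) (n : Nat) (pos : Nat) : Nat :=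
  if h : pos < n then
    if os.any (fun o => PySem.Chars.startswith (l.drop pos) o) then pos
    else pvScan l os n (pos + 1)
  else n
termination_by n - pos

def block_for_hotel_alt (full_text : String) (hotel_name : String) : String :=
  let lower := PySem.Str.lower full_text
  let target := PySem.Str.lower hotel_name
  let start := PySem.Str.find lower target
  if start = -1 then ""
  else
    let others := (HOTEL_ORDER.filter (fun h => PySem.Str.lower h ≠ target)).map
      (fun h => (PySem.Str.lower h).toList)
    let m := pvScan lower.toList others lower.toList.length (start + PySem.Str.len target).toNat
    let endv : Int := if m < lower.toList.length then (m : Int) else PySem.Str.len full_text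
    PySem.Str.slice full_text (some start) (some endv)

-- ===== PRECONDITION & SPEC =====
def Spec_block_for_hotel (full_text : String) (hotel_name : String) (out : String) : Prop := out = block_for_hotel_alt full_text hotel_name
instance (full_text : String) (hotel_name : String) (out : String) : Decidable (Spec_block_for_hotel full_text hotel_name out) := by unfold Spec_block_for_hotel; infer_instance

-- ===== CLAIM (what is proved, stated in full; the proofs are below) =====
def Claim_equal_block_for_hotel : Prop := ∀ (full_text : String) (hotel_name : String), Dom_block_for_hotel full_text hotel_name → Spec_block_for_hotel full_text hotel_name (block_for_hotel full_text hotel_name)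

-- ===== LEMMAS AND PROOFS =====

-- the "some other hotel name occurs at position j" predicate both sides compute
def pvQ (lowerS target : String) (j : Nat) : Prop :=
  ∃ o ∈ HOTEL_ORDER, PySem.Str.lower o ≠ target ∧ (PySem.Str.lower o).toList <+: lowerS.toList.drop j

lemma stepA_le (lo tg : String) (b e : Int) (o : String) : stepA lo tg b e o ≤ e := by
  unfold stepA; dsimp only; split_ifs <;> simp

lemma foldA_le_init (lo tg : String) (b : Int) (hs : List String) (init : Int) :
    hs.foldl (stepA lo tg b) init ≤ init := by
  induction hs generalizing init with
  | nil => simp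
  | cons hd tl ih => exact le_trans (ih _) (stepA_le lo tg b init hd)

lemma foldA_le_find (lo tg : String) (b : Int) (hs : List String) (init : Int)
    (o : String) (ho : o ∈ hs) (h1 : PySem.Str.lower o ≠ tg)
    (h2 : PySem.Str.findFrom lo (PySem.Str.lower o) b ≠ -1) :
    hs.foldl (stepA lo tg b) init ≤ PySem.Str.findFrom lo (PySem.Str.lower o) b := by
  induction hs generalizing init with
  | nil => cases ho
  | cons hd tl ih =>
    rcases List.mem_cons.1 ho with rfl | hmem
    · refine le_trans (foldA_le_init lo tg b tl _) ?_
      unfold stepA; dsimp only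
      rw [if_neg h1, if_pos h2]; exact min_le_right _ _
    · exact ih _ hmem

lemma foldA_cases (lo tg : String) (b : Int) (hs : List String) (init : Int) :
    hs.foldl (stepA lo tg b) init = init ∨
      ∃ o ∈ hs, PySem.Str.lower o ≠ tg ∧ PySem.Str.findFrom lo (PySem.Str.lower o) b ≠ -1 ∧
        hs.foldl (stepA lo tg b) init = PySem.Str.findFrom lo (PySem.Str.lower o) b := by
  induction hs generalizing init with
  | nil => exact Or.inl rfl
  | cons hd tl ih =>
    rcases ih (stepA lo tg b init hd) with h | ⟨o, ho, h1, h2, h3⟩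
    · rw [List.foldl_cons] at *
      by_cases hh1 : PySem.Str.lower hd = tg
      · left; rw [h]; unfold stepA; dsimp only; rw [if_pos hh1]
      · by_cases hh2 : PySem.Str.findFrom lo (PySem.Str.lower hd) b ≠ -1
        · rcases le_total init (PySem.Str.findFrom lo (PySem.Str.lower hd) b) with hle | hle
          · left; rw [h]; unfold stepA; dsimp only
            rw [if_neg hh1, if_pos hh2]; exact min_eq_left hle
          · right; exact ⟨hd, List.mem_cons_self, hh1, hh2, by
              rw [h]; unfold stepA; dsimp only
              rw [if_neg hh1, if_pos hh2]; exact min_eq_right hle⟩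
        · left; rw [h]; unfold stepA; dsimp only; rw [if_neg hh1, if_neg hh2]
    · right; exact ⟨o, List.mem_cons_of_mem _ ho, h1, h2, h3⟩

lemma pvScan_spec (l : List Char) (os : List (List Char)) (n : Nat) :
    ∀ k pos, n - pos = k → pos ≤ n →
      (pos ≤ pvScan l os n pos ∧ pvScan l os n pos ≤ n) ∧
      (pvScan l os n pos < n →
        os.any (fun o => PySem.Chars.startswith (l.drop (pvScan l os n pos)) o) = true) ∧
      (∀ j, pos ≤ j → j < pvScan l os n pos →
        os.any (fun o => PySem.Chars.startswith (l.drop j) o) = false) := by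
  intro k
  induction k with
  | zero =>
    intro pos hk hle
    have hpn : pos = n := by omega
    subst hpn
    rw [pvScan, dif_neg (lt_irrefl pos)]
    exact ⟨⟨le_refl _, le_refl _⟩, fun h => absurd h (lt_irrefl _),
      fun j h1 h2 => absurd (lt_of_le_of_lt h1 h2) (lt_irrefl _)⟩
  | succ k ih =>
    intro pos hk hle
    have hlt : pos < n := by omega
    rw [pvScan, dif_pos hlt]
    by_cases hany : os.any (fun o => PySem.Chars.startswith (l.drop pos) o) = true
    · rw [if_pos hany]
      exact ⟨⟨le_refl _, le_of_lt hlt⟩, fun _ => hany, fun j h1 h2 => absurd h1 (by omega)⟩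
    · rw [if_neg hany]
      obtain ⟨⟨i1, i2⟩, i3, i4⟩ := ih (pos + 1) (by omega) (by omega)
      refine ⟨⟨by omega, i2⟩, i3, fun j h1 h2 => ?_⟩
      rcases Nat.eq_or_lt_of_le h1 with rfl | h1'
      · exact Bool.eq_false_iff.2 hany
      · exact i4 j h1' h2

lemma pvAny_iff (lo tg : String) (j : Nat) :
    (((HOTEL_ORDER.filter (fun h => PySem.Str.lower h ≠ tg)).map
        (fun h => (PySem.Str.lower h).toList)).any
      (fun o => PySem.Chars.startswith (lo.toList.drop j) o) = true) ↔ pvQ lo tg j := by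
  simp only [pvQ, List.any_eq_true, List.mem_map, List.mem_filter, decide_eq_true_eq]
  constructor
  · rintro ⟨o', ⟨o, ⟨ho, h1⟩, rfl⟩, h2⟩
    exact ⟨o, ho, h1, (PySem.Chars.startswith_iff _ _).1 h2⟩
  · rintro ⟨o, ho, h1, h2⟩
    exact ⟨(PySem.Str.lower o).toList, ⟨o, ⟨ho, h1⟩, rfl⟩, (PySem.Chars.startswith_iff _ _).2 h2⟩

lemma pvLower_length (s : List Char) : (PySem.Chars.lower s).length = s.length := by
  simp [PySem.Chars.lower]

lemma pvHotels_nonempty : ∀ o ∈ HOTEL_ORDER, (PySem.Str.lower o).toList ≠ [] := by decide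

lemma pvQ_lt (lo tg : String) (j : Nat) (hq : pvQ lo tg j) : j < lo.toList.length := by
  obtain ⟨o, ho, _, hpre⟩ := hq
  by_contra hc
  rw [List.drop_eq_nil_of_le (by omega)] at hpre
  exact pvHotels_nonempty o ho (List.prefix_nil.1 hpre)

-- ===== VERDICT (by name: the statement is the Claim_ definition above) =====
theorem block_for_hotel_spec : Claim_equal_block_for_hotel := by
  intro ft hn _
  unfold Spec_block_for_hotel block_for_hotel block_for_hotel_alt
  dsimp only
  set lo := PySem.Str.lower ft with hlo
  set tg := PySem.Str.lower hn with htg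
  set s := PySem.Str.find lo tg with hsdef
  by_cases hs : s = -1
  · rw [if_pos hs, if_pos hs]
  rw [if_neg hs, if_neg hs]
  have hseq : s = PySem.Chars.find lo.toList tg.toList := by rw [hsdef, PySem.Str.find_eq]
  have hs0 : 0 ≤ s := by
    have h1 := PySem.Chars.neg_one_le_find lo.toList tg.toList
    rw [← hseq] at h1; omega
  have hlentg : PySem.Str.len tg = (tg.toList.length : Int) := PySem.Str.len_eq tg
  set base := (s + PySem.Str.len tg).toNat with hbase_def
  have hb_cast : ((base : Nat) : Int) = s + PySem.Str.len tg := by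
    rw [hbase_def]
    exact Int.toNat_of_nonneg (by rw [hlentg]; omega)
  have hpre_t : tg.toList <+: lo.toList.drop s.toNat := by
    have h1 := (PySem.Chars.find_spec (s := lo.toList) (sub := tg.toList) (by rw [← hseq]; exact hs0)).1
    rw [← hseq] at h1; exact h1
  have hlen_t : tg.toList.length ≤ lo.toList.length - s.toNat := by
    have h1 := hpre_t.length_le
    simpa [List.length_drop] using h1
  have hs_le : s ≤ (lo.toList.length : Int) := by
    rw [hseq]; exact PySem.Chars.find_le_length _ _
  have hbase_le : base ≤ lo.toList.length := by
    rw [hbase_def, hlentg]; omega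
  have hlenft : PySem.Str.len ft = ((lo.toList.length : Nat) : Int) := by
    rw [PySem.Str.len_eq]; congr 1
    rw [hlo, PySem.Str.toList_lower, pvLower_length]
  rw [← hb_cast]
  set endA := HOTEL_ORDER.foldl (stepA lo tg ((base : Nat) : Int)) (PySem.Str.len ft) with hendA
  have hA1 : endA ≤ ((lo.toList.length : Nat) : Int) := by
    rw [← hlenft]; exact foldA_le_init lo tg _ HOTEL_ORDER _
  have hA2 : endA = ((lo.toList.length : Nat) : Int) ∨
      ∃ j : Nat, base ≤ j ∧ endA = (j : Int) ∧ pvQ lo tg j := by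
    rcases foldA_cases lo tg ((base : Nat) : Int) HOTEL_ORDER (PySem.Str.len ft) with h | ⟨o, ho, h1, h2, h3⟩
    · left; rw [hendA, h, hlenft]
    · right
      rw [PySem.Str.findFrom_eq] at h2 h3
      obtain ⟨hge, hpre, _⟩ :=
        PySem.Chars.findFrom_natCast_spec lo.toList (PySem.Str.lower o).toList base hbase_le h2
      refine ⟨(PySem.Chars.findFrom lo.toList (PySem.Str.lower o).toList (base : Int)).toNat,
        by omega, ?_, o, ho, h1, ?_⟩
      · rw [hendA, h3]; exact (Int.toNat_of_nonneg (by omega)).symm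
      · exact hpre
  have hA3 : ∀ j : Nat, base ≤ j → (j : Int) < endA → ¬ pvQ lo tg j := by
    rintro j hj hlt ⟨o, ho, h1, hpre⟩
    have hdd : lo.toList.drop j = (lo.toList.drop base).drop (j - base) := by
      rw [List.drop_drop]; congr 1; omega
    have hinf : (PySem.Str.lower o).toList <:+: lo.toList.drop base := by
      rw [hdd] at hpre
      exact hpre.isInfix.trans (List.drop_suffix _ _).isInfix
    have h2 : PySem.Chars.findFrom lo.toList (PySem.Str.lower o).toList (base : Int) ≠ -1 := by
      rw [Ne, PySem.Chars.findFrom_natCast_eq_neg_one_iff lo.toList _ base hbase_le]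
      exact fun hcon => hcon hinf
    obtain ⟨hge, _, hmin⟩ :=
      PySem.Chars.findFrom_natCast_spec lo.toList (PySem.Str.lower o).toList base hbase_le h2
    have hle_j : (PySem.Chars.findFrom lo.toList (PySem.Str.lower o).toList (base : Int)).toNat ≤ j := by
      by_contra hc
      exact hmin j hj (by omega) hpre
    have hfold := foldA_le_find lo tg ((base : Nat) : Int) HOTEL_ORDER (PySem.Str.len ft) o ho h1
      (by rw [PySem.Str.findFrom_eq]; exact h2)
    rw [PySem.Str.findFrom_eq] at hfold
    rw [← hendA] at hfold
    omega
  set OS := (HOTEL_ORDER.filter (fun h => PySem.Str.lower h ≠ tg)).map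
    (fun h => (PySem.Str.lower h).toList) with hOS
  set m := pvScan lo.toList OS lo.toList.length base with hm_def
  obtain ⟨⟨hB1a, hB1b⟩, hB2, hB3⟩ :=
    pvScan_spec lo.toList OS lo.toList.length (lo.toList.length - base) base rfl hbase_le
  rw [← hm_def] at hB1a hB1b hB2 hB3
  have hQm : m < lo.toList.length → pvQ lo tg m := fun h => (pvAny_iff lo tg m).1 (hB2 h)
  have hnoQ : ∀ j, base ≤ j → j < m → ¬ pvQ lo tg j := by
    intro j h1 h2 hq
    have hf := hB3 j h1 h2
    rw [← pvAny_iff lo tg j] at hq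
    rw [hf] at hq
    cases hq
  have hEnd : endA = (if m < lo.toList.length then (m : Int) else PySem.Str.len ft) := by
    by_cases hmlt : m < lo.toList.length
    · rw [if_pos hmlt]
      have hQ := hQm hmlt
      have hle : endA ≤ (m : Int) := by
        by_contra hc
        exact hA3 m hB1a (by omega) hQ
      rcases hA2 with h | ⟨j, hj1, hj2, hj3⟩
      · exfalso; rw [h] at hle; omega
      · have hjm : ¬ j < m := fun hc => hnoQ j hj1 hc hj3
        rw [hj2] at hle ⊢
        omega
    · rw [if_neg hmlt]
      rcases hA2 with h | ⟨j, hj1, hj2, hj3⟩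
      · rw [h, hlenft]
      · exfalso
        exact hnoQ j hj1 (by have := pvQ_lt lo tg j hj3; omega) hj3
  rw [hEnd]
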